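-- pv_equiv track=rewrite | github.com/jessedwatson/ficc_python | ficc/utils/adding_flags.py | indices_to_remove_from_beginning_or_end_to_reach_sum
-- ===== SOURCE A (Python) =====
-- def indices_to_remove_from_beginning_or_end_to_reach_sum(lst, target_sum):
--     '''The goal is to find a continuous stream of items in `lst` where at least one of the
--     endpoints of `lst`, such that the sum of this stream of items equals `target_sum`. If
--     such a sublist cannot be formed, then return `None`. Otherwise return the indices that
--     should be removed from `lst` so that summing the remaining items equals `target_sum`.'''
--     # forward pass
--     lst_total = sum(lst)
--     assert lst_total > target_sum
--     indices = []
--     for index, item in enumerate(lst):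
--         lst_total -= item
--         indices.append(index)
--         if lst_total == target_sum:
--             return indices
--     # backward pass
--     lst_total = sum(lst)
--     indices = []
--     for index, item in reversed(list(enumerate(lst))):    # traverse a list in reverse order while preserving the indices: https://stackoverflow.com/questions/529424/traverse-a-list-in-reverse-order-in-python
--         lst_total -= item
--         indices.append(index)
--         if lst_total == target_sum:
--             return indices
--     return None    # no such sublist found
-- ===== SOURCE B (Python) =====
-- def indices_to_remove_from_beginning_or_end_to_reach_sum(lst, target_sum):
--     '''Table-based: build cumulative-sum -> earliest-index maps for prefixes and
--     suffixes, then answer by a single dictionary lookup of the amount to remove.'''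
--     total = sum(lst)
--     assert total > target_sum
--     remove = total - target_sum
--     prefix = {}
--     acc = 0
--     for i, x in enumerate(lst):
--         acc += x
--         prefix.setdefault(acc, i)
--     if remove in prefix:
--         return list(range(prefix[remove] + 1))
--     suffix = {}
--     acc = 0
--     for j in range(len(lst) - 1, -1, -1):
--         acc += lst[j]
--         suffix.setdefault(acc, j)
--     if remove in suffix:
--         return list(range(len(lst) - 1, suffix[remove] - 1, -1))
--     return None
-- ===== Notes on version B (the rewrite author's own statement) =====
-- stated objective: alternative
-- what changed: Replaces A's two early-exit running-total scans by building prefix- and suffix-cumulative-sum dictionaries (earliest index via setdefault) and answering with a single lookup of remove = sum(lst) - target_sum.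
import Mathlib
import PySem

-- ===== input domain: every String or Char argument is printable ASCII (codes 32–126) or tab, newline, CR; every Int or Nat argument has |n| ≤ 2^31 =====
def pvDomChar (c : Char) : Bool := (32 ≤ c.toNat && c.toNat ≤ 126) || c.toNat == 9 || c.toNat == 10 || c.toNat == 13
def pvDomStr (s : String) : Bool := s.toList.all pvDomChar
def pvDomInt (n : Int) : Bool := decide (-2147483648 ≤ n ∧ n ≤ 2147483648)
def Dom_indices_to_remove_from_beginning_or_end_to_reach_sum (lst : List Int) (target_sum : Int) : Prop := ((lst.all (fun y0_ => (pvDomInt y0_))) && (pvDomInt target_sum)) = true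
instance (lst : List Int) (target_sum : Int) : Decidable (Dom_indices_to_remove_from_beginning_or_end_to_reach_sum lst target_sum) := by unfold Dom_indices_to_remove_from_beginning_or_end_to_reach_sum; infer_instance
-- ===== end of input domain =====

-- B replaces A's two early-exit running-total scans by cumulative-sum → earliest-index
-- dictionaries plus one lookup (objective: alternative; return value only, no mutation).

-- ===== PORT A =====
-- one loop body shared by A's forward and backward passes (A's two loops are textually identical)
def pvALoop (ps : List (Int × Int)) (tot : Int) (inds : List Int) (tgt : Int) : Option (List Int) :=
  match ps with
  | [] => none
  | (i, x) :: rest =>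
    let tot' := tot - x
    let inds' := inds ++ [i]
    if tot' = tgt then some inds' else pvALoop rest tot' inds' tgt

def indices_to_remove_from_beginning_or_end_to_reach_sum (lst : List Int) (target_sum : Int) : Option (List Int) :=
  let lst_total := lst.sum
  if lst_total > target_sum then
    -- forward pass
    match pvALoop (PySem.List.enumerate lst 0) lst_total [] target_sum with
    | some r => some r
    | none =>
      -- backward pass over reversed(list(enumerate(lst)))
      match pvALoop ((PySem.List.enumerate lst 0).reverse) lst.sum [] target_sum with
      | some r => some r
      | none => none
  else none  -- assert lst_total > target_sum fails: excluded by Pre_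

-- ===== PORT B =====
-- fold step building (running cum, dict mapping cum value to its earliest index via setdefault)
def pvBStep (st : Int × PySem.Dict Int Int) (p : Int × Int) : Int × PySem.Dict Int Int :=
  (st.1 + p.2, st.2.setdefault (st.1 + p.2) p.1)

def indices_to_remove_from_beginning_or_end_to_reach_sum_alt (lst : List Int) (target_sum : Int) : Option (List Int) :=
  let total := lst.sum
  if total > target_sum then
    let remove := total - target_sum
    let prefixD := ((PySem.List.enumerate lst 0).foldl pvBStep (0, PySem.Dict.empty)).2
    match prefixD.get? remove with
    | some k => some (PySem.List.pyRange 0 (k + 1) 1)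
    | none =>
      let suffix := ((PySem.List.pyRange (PySem.List.len lst - 1) (-1) (-1)).foldl
        (fun st j => pvBStep st (j, PySem.List.pyGetD lst j 0)) (0, PySem.Dict.empty)).2
      match suffix.get? remove with
      | some j => some (PySem.List.pyRange (PySem.List.len lst - 1) (j - 1) (-1))
      | none => none
  else none  -- assert total > target_sum fails: excluded by Pre_

-- ===== PRECONDITION & SPEC =====
-- A's (and B's) assert raises AssertionError unless sum(lst) > target_sum; exactly those inputs are excluded.
def Pre_indices_to_remove_from_beginning_or_end_to_reach_sum (lst : List Int) (target_sum : Int) : Prop := lst.sum > target_sum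
instance (lst : List Int) (target_sum : Int) : Decidable (Pre_indices_to_remove_from_beginning_or_end_to_reach_sum lst target_sum) := by unfold Pre_indices_to_remove_from_beginning_or_end_to_reach_sum; infer_instance
def pvWitness_indices_to_remove_from_beginning_or_end_to_reach_sum : List Int × Int := ([1, 2], 1)

def Spec_indices_to_remove_from_beginning_or_end_to_reach_sum (lst : List Int) (target_sum : Int) (out : Option (List Int)) : Prop := out = indices_to_remove_from_beginning_or_end_to_reach_sum_alt lst target_sum
instance (lst : List Int) (target_sum : Int) (out : Option (List Int)) : Decidable (Spec_indices_to_remove_from_beginning_or_end_to_reach_sum lst target_sum out) := by unfold Spec_indices_to_remove_from_beginning_or_end_to_reach_sum; infer_instance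

-- ===== CLAIM (what is proved, stated in full; the proofs are below) =====
def Claim_equal_indices_to_remove_from_beginning_or_end_to_reach_sum : Prop := ∀ (lst : List Int) (target_sum : Int), Dom_indices_to_remove_from_beginning_or_end_to_reach_sum lst target_sum → Pre_indices_to_remove_from_beginning_or_end_to_reach_sum lst target_sum → Spec_indices_to_remove_from_beginning_or_end_to_reach_sum lst target_sum (indices_to_remove_from_beginning_or_end_to_reach_sum lst target_sum)

-- ===== LEMMAS AND PROOFS =====

-- first index in ps (pairs (index, item)) at which the running cumulative sum equals r
def pvHit (ps : List (Int × Int)) (acc r : Int) : Option Int :=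
  match ps with
  | [] => none
  | (i, x) :: rest => if acc + x = r then some i else pvHit rest (acc + x) r

-- the list of indices consumed up to and including the first hit
def pvHitIdx (ps : List (Int × Int)) (acc r : Int) : Option (List Int) :=
  match ps with
  | [] => none
  | (i, x) :: rest => if acc + x = r then some [i] else (pvHitIdx rest (acc + x) r).map (i :: ·)

theorem pvALoop_eq_hitIdx (ps : List (Int × Int)) : ∀ (tot tgt acc r : Int) (inds : List Int),
    tot + acc = tgt + r →
    pvALoop ps tot inds tgt = (pvHitIdx ps acc r).map (inds ++ ·) := by
  induction ps with
  | nil => intro tot tgt acc r inds h; simp [pvALoop, pvHitIdx]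
  | cons p rest ih =>
    intro tot tgt acc r inds h
    obtain ⟨i, x⟩ := p
    simp only [pvALoop, pvHitIdx]
    have hc : (tot - x = tgt) ↔ (acc + x = r) := by omega
    by_cases hx : acc + x = r
    · simp [hx, hc.mpr hx]
    · rw [if_neg hx, if_neg (fun hh => hx (hc.mp hh))]
      rw [ih (tot - x) tgt (acc + x) r (inds ++ [i]) (by omega)]
      cases pvHitIdx rest (acc + x) r <;> simp

theorem pvHit_mem (ps : List (Int × Int)) : ∀ (acc r k : Int),
    pvHit ps acc r = some k → k ∈ ps.map Prod.fst := by
  induction ps with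
  | nil => intro acc r k h; simp [pvHit] at h
  | cons p rest ih =>
    intro acc r k h
    obtain ⟨i, x⟩ := p
    simp only [pvHit] at h
    by_cases hx : acc + x = r
    · rw [if_pos hx] at h; simp at h; simp [h]
    · rw [if_neg hx] at h
      simp only [List.map_cons, List.mem_cons]
      exact Or.inr (ih _ _ _ h)

theorem pvHitIdx_asc (ps : List (Int × Int)) : ∀ (s acc r : Int),
    ps.map Prod.fst = PySem.List.pyRange s (s + ps.length) 1 →
    pvHitIdx ps acc r = (pvHit ps acc r).map (fun k => PySem.List.pyRange s (k + 1) 1) := by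
  induction ps with
  | nil => intro s acc r _; simp [pvHitIdx, pvHit]
  | cons p rest ih =>
    intro s acc r hshape
    obtain ⟨i, x⟩ := p
    have hlen : s < s + ((i, x) :: rest).length := by simp
    rw [PySem.List.pyRange_one_cons (by exact_mod_cast hlen)] at hshape
    simp only [List.map_cons, List.cons.injEq] at hshape
    obtain ⟨hi, hrest⟩ := hshape
    have hrest' : rest.map Prod.fst = PySem.List.pyRange (s + 1) ((s + 1) + rest.length) 1 := by
      rw [hrest]; congr 1; simp; omega
    simp only [pvHitIdx, pvHit]
    by_cases hx : acc + x = r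
    · simp [hx, hi, PySem.List.pyRange_one_singleton]
    · rw [if_neg hx, if_neg hx, ih (s + 1) (acc + x) r hrest']
      cases hhit : pvHit rest (acc + x) r with
      | none => simp
      | some k =>
        have hk : k ∈ rest.map Prod.fst := pvHit_mem rest _ _ _ hhit
        rw [hrest'] at hk
        have hk' : s + 1 ≤ k := (PySem.List.mem_pyRange_one.mp hk).1
        simp only [Option.map_some, hi]
        conv_rhs => rw [PySem.List.pyRange_one_cons (by omega : s < k + 1)]

theorem pvHitIdx_desc (ps : List (Int × Int)) : ∀ (t acc r : Int),
    ps.map Prod.fst = PySem.List.pyRange t (t - ps.length) (-1) →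
    pvHitIdx ps acc r = (pvHit ps acc r).map (fun k => PySem.List.pyRange t (k - 1) (-1)) := by
  induction ps with
  | nil => intro t acc r _; simp [pvHitIdx, pvHit]
  | cons p rest ih =>
    intro t acc r hshape
    obtain ⟨i, x⟩ := p
    have hlen : t - (((i, x) :: rest).length : Int) < t := by simp
    rw [PySem.List.pyRange_neg_one_cons hlen] at hshape
    simp only [List.map_cons, List.cons.injEq] at hshape
    obtain ⟨hi, hrest⟩ := hshape
    have hrest' : rest.map Prod.fst = PySem.List.pyRange (t - 1) ((t - 1) - rest.length) (-1) := by
      rw [hrest]; congr 1; simp; omega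
    simp only [pvHitIdx, pvHit]
    by_cases hx : acc + x = r
    · rw [if_pos hx, if_pos hx, Option.map_some]
      rw [hi, PySem.List.pyRange_neg_one_cons (by omega), PySem.List.pyRange_neg_one_eq_nil (by omega)]
    · rw [if_neg hx, if_neg hx, ih (t - 1) (acc + x) r hrest']
      cases hhit : pvHit rest (acc + x) r with
      | none => simp
      | some k =>
        have hk : k ∈ rest.map Prod.fst := pvHit_mem rest _ _ _ hhit
        rw [hrest'] at hk
        have hk' : k ≤ t - 1 := (PySem.List.mem_pyRange_neg_one.mp hk).2
        simp only [Option.map_some, hi]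
        conv_rhs => rw [PySem.List.pyRange_neg_one_cons (by omega : k - 1 < t)]

theorem pvBuild_get? (ps : List (Int × Int)) : ∀ (acc : Int) (d : PySem.Dict Int Int) (r : Int),
    ((ps.foldl pvBStep (acc, d)).2).get? r = (d.get? r).or (pvHit ps acc r) := by
  induction ps with
  | nil => intro acc d r; simp [pvHit, Option.or_none]
  | cons p rest ih =>
    intro acc d r
    obtain ⟨i, x⟩ := p
    simp only [List.foldl_cons, pvBStep, pvHit]
    rw [ih]
    by_cases hx : acc + x = r
    · rw [if_pos hx, hx, PySem.Dict.get?_setdefault_self]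
      cases hd : d.get? r <;> cases pvHit rest (acc + x) r <;> simp
    · rw [if_neg hx, PySem.Dict.get?_setdefault_of_ne]
      exact fun h => hx h.symm

-- shape of the index stream of the forward pass
theorem pvEnum_fst (lst : List Int) :
    (PySem.List.enumerate lst 0).map Prod.fst
      = PySem.List.pyRange 0 (0 + ((PySem.List.enumerate lst 0).length : Int)) 1 := by
  rw [PySem.List.map_fst_enumerate]; congr 1; simp [PySem.List.length_enumerate]

-- shape of the index stream of the backward pass
theorem pvEnumRev_fst (lst : List Int) :
    ((PySem.List.enumerate lst 0).reverse.map Prod.fst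
      = PySem.List.pyRange ((lst.length : Int) - 1) (((lst.length : Int) - 1) - ((PySem.List.enumerate lst 0).reverse.length : Int)) (-1)) := by
  rw [List.map_reverse, PySem.List.map_fst_enumerate]
  rw [PySem.List.pyRange_neg_one_eq_reverse]
  congr 1
  simp [PySem.List.length_enumerate]

-- B's suffix fold is the pair fold over the reversed enumeration
theorem pvSuffix_pairs (lst : List Int) :
    (PySem.List.pyRange (PySem.List.len lst - 1) (-1) (-1)).map (fun j => (j, PySem.List.pyGetD lst j 0))
      = (PySem.List.enumerate lst 0).reverse := by
  rw [PySem.List.pyRange_neg_one_eq_reverse, List.map_reverse]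
  congr 1
  rw [PySem.List.enumerate_eq_map_pyRange (d := 0)]
  congr 2
  simp [PySem.List.len_eq]

-- ===== VERDICT (by name: the statement is the Claim_ definition above) =====
theorem indices_to_remove_from_beginning_or_end_to_reach_sum_spec : Claim_equal_indices_to_remove_from_beginning_or_end_to_reach_sum := by
  intro lst target_sum _ hpre
  unfold Spec_indices_to_remove_from_beginning_or_end_to_reach_sum
  unfold indices_to_remove_from_beginning_or_end_to_reach_sum indices_to_remove_from_beginning_or_end_to_reach_sum_alt
  have hgt : lst.sum > target_sum := hpre
  simp only [if_pos hgt]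
  set E := PySem.List.enumerate lst 0 with hE
  set remove := lst.sum - target_sum with hrem
  -- forward pass
  have hfwd : pvALoop E lst.sum [] target_sum
      = (pvHit E 0 remove).map (fun k => PySem.List.pyRange 0 (k + 1) 1) := by
    rw [pvALoop_eq_hitIdx E lst.sum target_sum 0 remove [] (by omega),
        pvHitIdx_asc E 0 0 remove (pvEnum_fst lst)]
    cases pvHit E 0 remove <;> simp
  have hbget : ((E.foldl pvBStep (0, PySem.Dict.empty)).2).get? remove = pvHit E 0 remove := by
    rw [pvBuild_get?]; simp
  rw [hfwd, hbget]
  cases hh : pvHit E 0 remove with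
  | some k => simp
  | none =>
    simp only [Option.map_none]
    -- backward pass
    have hsuff : ((PySem.List.pyRange (PySem.List.len lst - 1) (-1) (-1)).foldl
        (fun st j => pvBStep st (j, PySem.List.pyGetD lst j 0)) (0, PySem.Dict.empty)).2.get? remove
        = pvHit E.reverse 0 remove := by
      rw [← List.foldl_map (f := fun j => (j, PySem.List.pyGetD lst j 0)) (g := pvBStep),
          pvSuffix_pairs, pvBuild_get?]
      simp
      rfl
    have hbwd : pvALoop E.reverse lst.sum [] target_sum
        = (pvHit E.reverse 0 remove).map (fun k => PySem.List.pyRange ((lst.length : Int) - 1) (k - 1) (-1)) := by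
      rw [pvALoop_eq_hitIdx E.reverse lst.sum target_sum 0 remove [] (by omega),
          pvHitIdx_desc E.reverse ((lst.length : Int) - 1) 0 remove (pvEnumRev_fst lst)]
      cases pvHit E.reverse 0 remove <;> simp
    rw [hbwd, hsuff]
    cases pvHit E.reverse 0 remove with
    | some j => simp [PySem.List.len_eq]
    | none => simp
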